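-- pv_equiv track=rewrite | github.com/jcolinpatrick/kryptos | scripts/team/e_point_keyword.py | null_masks_from_d
-- ===== SOURCE A (Python) =====
-- from typing import Dict, List, Optional, Tuple
--
-- def null_masks_from_d(d_vals: List[int]) -> List[Tuple[str, List[int]]]:
--     """Generate null masks from D values. Returns (description, null_positions) pairs."""
--     n = len(d_vals)
--     masks = []
--
--     # Method 1: D[i] mod 4 == r
--     for r in range(4):
--         nulls = [i for i in range(n) if d_vals[i] % 4 == r]
--         if 20 <= len(nulls) <= 28:  # near 24
--             masks.append((f"mod4=={r}(n={len(nulls)})", nulls))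
--
--     # Method 2: D[i] mod 5 == r
--     for r in range(5):
--         nulls = [i for i in range(n) if d_vals[i] % 5 == r]
--         if 15 <= len(nulls) <= 28:
--             masks.append((f"mod5=={r}(n={len(nulls)})", nulls))
--
--     # Method 3: D[i] < threshold
--     for thresh in range(1, 26):
--         nulls = [i for i in range(n) if d_vals[i] < thresh]
--         if len(nulls) == 24:
--             masks.append((f"D<{thresh}(n=24)", nulls))
--         elif 22 <= len(nulls) <= 26 and len(nulls) != 24:
--             masks.append((f"D<{thresh}(n={len(nulls)})", nulls))
--
--     # Method 4: Bottom 24 by D value (lowest D = null)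
--     ranked = sorted(range(n), key=lambda i: (d_vals[i], i))
--     masks.append(("bottom24", ranked[:24]))
--
--     # Method 5: Top 24 by D value (highest D = null)
--     masks.append(("top24", ranked[-24:]))
--
--     # Method 6: D[i] == 0 (exact matches)
--     zeros = [i for i in range(n) if d_vals[i] == 0]
--     if 5 <= len(zeros) <= 40:
--         masks.append((f"D==0(n={len(zeros)})", zeros))
--
--     # Method 7: D[i] is even
--     evens = [i for i in range(n) if d_vals[i] % 2 == 0]
--     if 20 <= len(evens) <= 28:
--         masks.append((f"even(n={len(evens)})", evens))
--
--     # Method 8: D[i] is odd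
--     odds = [i for i in range(n) if d_vals[i] % 2 == 1]
--     if 20 <= len(odds) <= 28:
--         masks.append((f"odd(n={len(odds)})", odds))
--
--     return masks
-- ===== SOURCE B (Python) =====
-- def _buckets(d_vals):
--     """Single distributing pass: file each index into its bucket tables."""
--     mod4 = {}
--     mod5 = {}
--     thr = {}
--     zeros = []
--     evens = []
--     odds = []
--     for i, d in enumerate(d_vals):
--         mod4.setdefault(d % 4, []).append(i)
--         mod5.setdefault(d % 5, []).append(i)
--         for t in range(max(d + 1, 1), 26):
--             thr.setdefault(t, []).append(i)
--         if d == 0: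
--             zeros.append(i)
--         if d % 2 == 0:
--             evens.append(i)
--         else:
--             odds.append(i)
--     return mod4, mod5, thr, zeros, evens, odds
--
--
-- def null_masks_from_d(d_vals):
--     """One pass distributes indices into bucket tables (mod4 / mod5 / threshold /
--     zeros / evens / odds); masks are then emitted from the pre-built buckets."""
--     n = len(d_vals)
--     mod4, mod5, thr, zeros, evens, odds = _buckets(d_vals)
--     masks = []
--     for r in range(4):
--         nulls = mod4.get(r, [])
--         if 20 <= len(nulls) <= 28:
--             masks.append((f"mod4=={r}(n={len(nulls)})", nulls))
--     for r in range(5):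
--         nulls = mod5.get(r, [])
--         if 15 <= len(nulls) <= 28:
--             masks.append((f"mod5=={r}(n={len(nulls)})", nulls))
--     for t in range(1, 26):
--         nulls = thr.get(t, [])
--         if len(nulls) == 24:
--             masks.append((f"D<{t}(n=24)", nulls))
--         elif 22 <= len(nulls) <= 26 and len(nulls) != 24:
--             masks.append((f"D<{t}(n={len(nulls)})", nulls))
--     ranked = sorted(range(n), key=lambda i: (d_vals[i], i))
--     masks.append(("bottom24", ranked[:24]))
--     masks.append(("top24", ranked[-24:]))
--     if 5 <= len(zeros) <= 40:
--         masks.append((f"D==0(n={len(zeros)})", zeros))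
--     if 20 <= len(evens) <= 28:
--         masks.append((f"even(n={len(evens)})", evens))
--     if 20 <= len(odds) <= 28:
--         masks.append((f"odd(n={len(odds)})", odds))
--     return masks
-- ===== Notes on version B (the rewrite author's own statement) =====
-- stated objective: alternative
-- what changed: A rescans d_vals once per rule (36 independent range(n) comprehensions); B makes a single distributing pass over enumerate(d_vals) that files each index into bucket tables (mod4/mod5/threshold dicts, zeros/evens/odds lists) and then emits the masks from the pre-built buckets under the same guards.
import Mathlib
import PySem

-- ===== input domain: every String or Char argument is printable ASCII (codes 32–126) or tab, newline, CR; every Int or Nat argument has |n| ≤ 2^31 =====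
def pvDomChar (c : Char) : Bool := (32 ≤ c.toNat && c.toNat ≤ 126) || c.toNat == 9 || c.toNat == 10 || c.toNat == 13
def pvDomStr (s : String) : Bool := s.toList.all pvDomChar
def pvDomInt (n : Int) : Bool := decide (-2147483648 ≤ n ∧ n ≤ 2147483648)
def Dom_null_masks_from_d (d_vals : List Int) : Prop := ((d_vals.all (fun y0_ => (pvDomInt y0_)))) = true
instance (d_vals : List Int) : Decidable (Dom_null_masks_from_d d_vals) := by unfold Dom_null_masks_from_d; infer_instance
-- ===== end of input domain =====

-- B re-implements A by a single distributing pass that files every index into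
-- bucket tables (mod4/mod5/threshold dicts and zeros/evens/odds lists) and then
-- emits the masks from the pre-built buckets under A's guards (alternative
-- decomposition; same results, similar cost).

-- ===== PORT A =====
def null_masks_from_d (d_vals : List Int) : List (String × List Int) :=
  let n : Int := d_vals.length
  let masks : List (String × List Int) := []
  -- Method 1
  let masks := (PySem.List.pyRange 0 4 1).foldl (fun masks r =>
    let nulls := (PySem.List.pyRange 0 n 1).filter
      (fun i => PySem.Int.mod (PySem.List.pyGetD d_vals i 0) 4 == r)
    if 20 ≤ (nulls.length : Int) ∧ (nulls.length : Int) ≤ 28 then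
      masks ++ [("mod4==" ++ PySem.Int.toStr r ++ "(n=" ++ PySem.Int.toStr nulls.length ++ ")", nulls)]
    else masks) masks
  -- Method 2
  let masks := (PySem.List.pyRange 0 5 1).foldl (fun masks r =>
    let nulls := (PySem.List.pyRange 0 n 1).filter
      (fun i => PySem.Int.mod (PySem.List.pyGetD d_vals i 0) 5 == r)
    if 15 ≤ (nulls.length : Int) ∧ (nulls.length : Int) ≤ 28 then
      masks ++ [("mod5==" ++ PySem.Int.toStr r ++ "(n=" ++ PySem.Int.toStr nulls.length ++ ")", nulls)]
    else masks) masks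
  -- Method 3
  let masks := (PySem.List.pyRange 1 26 1).foldl (fun masks thresh =>
    let nulls := (PySem.List.pyRange 0 n 1).filter
      (fun i => decide (PySem.List.pyGetD d_vals i 0 < thresh))
    if (nulls.length : Int) = 24 then
      masks ++ [("D<" ++ PySem.Int.toStr thresh ++ "(n=24)", nulls)]
    else if 22 ≤ (nulls.length : Int) ∧ (nulls.length : Int) ≤ 26 ∧ (nulls.length : Int) ≠ 24 then
      masks ++ [("D<" ++ PySem.Int.toStr thresh ++ "(n=" ++ PySem.Int.toStr nulls.length ++ ")", nulls)]
    else masks) masks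
  -- Methods 4 & 5
  let ranked := PySem.List.sorted2 (PySem.List.pyRange 0 n 1)
    (fun i => PySem.List.pyGetD d_vals i 0) (fun i => i)
  let masks := masks ++ [("bottom24", PySem.List.slice ranked none (some 24))]
  let masks := masks ++ [("top24", PySem.List.slice ranked (some (-24)) none)]
  -- Method 6
  let zeros := (PySem.List.pyRange 0 n 1).filter (fun i => PySem.List.pyGetD d_vals i 0 == 0)
  let masks := if 5 ≤ (zeros.length : Int) ∧ (zeros.length : Int) ≤ 40 then
      masks ++ [("D==0(n=" ++ PySem.Int.toStr zeros.length ++ ")", zeros)]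
    else masks
  -- Method 7
  let evens := (PySem.List.pyRange 0 n 1).filter
    (fun i => PySem.Int.mod (PySem.List.pyGetD d_vals i 0) 2 == 0)
  let masks := if 20 ≤ (evens.length : Int) ∧ (evens.length : Int) ≤ 28 then
      masks ++ [("even(n=" ++ PySem.Int.toStr evens.length ++ ")", evens)]
    else masks
  -- Method 8
  let odds := (PySem.List.pyRange 0 n 1).filter
    (fun i => PySem.Int.mod (PySem.List.pyGetD d_vals i 0) 2 == 1)
  let masks := if 20 ≤ (odds.length : Int) ∧ (odds.length : Int) ≤ 28 then
      masks ++ [("odd(n=" ++ PySem.Int.toStr odds.length ++ ")", odds)]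
    else masks
  masks

-- ===== PORT B =====
-- state of B's distributing pass: (mod4, mod5, thr, zeros, evens, odds)
def pvBState : Type :=
  PySem.Dict Int (List Int) × PySem.Dict Int (List Int) × PySem.Dict Int (List Int) ×
  List Int × List Int × List Int

-- loop body of Source B's _buckets helper
def pvStep (s : pvBState) (p : Int × Int) : pvBState :=
  (s.1.modify (PySem.Int.mod p.2 4) [] (· ++ [p.1]),
   s.2.1.modify (PySem.Int.mod p.2 5) [] (· ++ [p.1]),
   (PySem.List.pyRange (max (p.2 + 1) 1) 26 1).foldl
     (fun d t => d.modify t [] (· ++ [p.1])) s.2.2.1,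
   (if p.2 == 0 then s.2.2.2.1 ++ [p.1] else s.2.2.2.1),
   (if PySem.Int.mod p.2 2 == 0 then s.2.2.2.2.1 ++ [p.1] else s.2.2.2.2.1),
   (if PySem.Int.mod p.2 2 == 0 then s.2.2.2.2.2 else s.2.2.2.2.2 ++ [p.1]))

-- Source B's _buckets: the single distributing pass over enumerate(d_vals)
def pvBuckets (d_vals : List Int) : pvBState :=
  (PySem.List.enumerate d_vals 0).foldl pvStep
    (PySem.Dict.empty, PySem.Dict.empty, PySem.Dict.empty, [], [], [])

def null_masks_from_d_alt (d_vals : List Int) : List (String × List Int) :=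
  let n : Int := d_vals.length
  let st := pvBuckets d_vals
  let masks : List (String × List Int) := []
  let masks := (PySem.List.pyRange 0 4 1).foldl (fun masks r =>
    let nulls := st.1.getD r []
    if 20 ≤ (nulls.length : Int) ∧ (nulls.length : Int) ≤ 28 then
      masks ++ [("mod4==" ++ PySem.Int.toStr r ++ "(n=" ++ PySem.Int.toStr nulls.length ++ ")", nulls)]
    else masks) masks
  let masks := (PySem.List.pyRange 0 5 1).foldl (fun masks r =>
    let nulls := st.2.1.getD r []
    if 15 ≤ (nulls.length : Int) ∧ (nulls.length : Int) ≤ 28 then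
      masks ++ [("mod5==" ++ PySem.Int.toStr r ++ "(n=" ++ PySem.Int.toStr nulls.length ++ ")", nulls)]
    else masks) masks
  let masks := (PySem.List.pyRange 1 26 1).foldl (fun masks t =>
    let nulls := st.2.2.1.getD t []
    if (nulls.length : Int) = 24 then
      masks ++ [("D<" ++ PySem.Int.toStr t ++ "(n=24)", nulls)]
    else if 22 ≤ (nulls.length : Int) ∧ (nulls.length : Int) ≤ 26 ∧ (nulls.length : Int) ≠ 24 then
      masks ++ [("D<" ++ PySem.Int.toStr t ++ "(n=" ++ PySem.Int.toStr nulls.length ++ ")", nulls)]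
    else masks) masks
  let ranked := PySem.List.sorted2 (PySem.List.pyRange 0 n 1)
    (fun i => PySem.List.pyGetD d_vals i 0) (fun i => i)
  let masks := masks ++ [("bottom24", PySem.List.slice ranked none (some 24))]
  let masks := masks ++ [("top24", PySem.List.slice ranked (some (-24)) none)]
  let masks := if 5 ≤ (st.2.2.2.1.length : Int) ∧ (st.2.2.2.1.length : Int) ≤ 40 then
      masks ++ [("D==0(n=" ++ PySem.Int.toStr st.2.2.2.1.length ++ ")", st.2.2.2.1)]
    else masks
  let masks := if 20 ≤ (st.2.2.2.2.1.length : Int) ∧ (st.2.2.2.2.1.length : Int) ≤ 28 then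
      masks ++ [("even(n=" ++ PySem.Int.toStr st.2.2.2.2.1.length ++ ")", st.2.2.2.2.1)]
    else masks
  let masks := if 20 ≤ (st.2.2.2.2.2.length : Int) ∧ (st.2.2.2.2.2.length : Int) ≤ 28 then
      masks ++ [("odd(n=" ++ PySem.Int.toStr st.2.2.2.2.2.length ++ ")", st.2.2.2.2.2)]
    else masks
  masks

-- ===== PRECONDITION & SPEC =====
def Spec_null_masks_from_d (d_vals : List Int) (out : List (String × List Int)) : Prop := out = null_masks_from_d_alt d_vals
instance (d_vals : List Int) (out : List (String × List Int)) : Decidable (Spec_null_masks_from_d d_vals out) := by unfold Spec_null_masks_from_d; infer_instance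

-- ===== CLAIM (what is proved, stated in full; the proofs are below) =====
def Claim_equal_null_masks_from_d : Prop := ∀ (d_vals : List Int), Dom_null_masks_from_d d_vals → Spec_null_masks_from_d d_vals (null_masks_from_d d_vals)

-- ===== LEMMAS AND PROOFS =====

lemma pv_getD_foldl_modify_mem (ks : List Int) (hnd : ks.Nodup) (d : PySem.Dict Int (List Int))
    (i t : Int) :
    (ks.foldl (fun d k => d.modify k [] (· ++ [i])) d).getD t [] =
      if t ∈ ks then d.getD t [] ++ [i] else d.getD t [] := by
  induction ks generalizing d with
  | nil => simp
  | cons k ks ih =>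
    simp only [List.nodup_cons] at hnd
    simp only [List.foldl_cons]
    rw [ih hnd.2]
    by_cases hk : t = k
    · subst hk
      simp [hnd.1, PySem.Dict.getD_modify_self]
    · rw [PySem.Dict.getD_modify_of_ne _ _ _ hk]
      simp [hk]

lemma pv_group_getD (xs : List (Int × Int)) (key : Int × Int → Int)
    (d : PySem.Dict Int (List Int)) (c : Int) :
    (xs.foldl (fun s p => s.modify (key p) [] (· ++ [p.1])) d).getD c []
      = d.getD c [] ++ (xs.filter (fun p => key p == c)).map (·.1) := by
  have h := PySem.Dict.getD_foldl_modify_append (xs.map (fun p => (key p, p.1))) d c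
  rw [List.foldl_map] at h
  simpa [List.filter_map, Function.comp] using h

lemma pv_enum_filter (xs : List Int) (pred : Int → Bool) :
    ((PySem.List.enumerate xs 0).filter (fun p => pred p.2)).map (·.1)
      = (PySem.List.pyRange 0 (xs.length : Int) 1).filter
          (fun i => pred (PySem.List.pyGetD xs i 0)) := by
  rw [PySem.List.enumerate_eq_map_pyRange xs 0]
  simp [List.filter_map, Function.comp_def]

lemma pv_odds_flip (acc : List Int) (p : Int × Int) :
    (if PySem.Int.mod p.2 2 == 0 then acc else acc ++ [p.1])
      = (if PySem.Int.mod p.2 2 == 1 then acc ++ [p.1] else acc) := by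
  rcases PySem.Int.mod_two_eq p.2 with h | h <;> simp only [h] <;> norm_num

-- B's single pass with six independent accumulators is six independent folds
lemma pv_split (xs : List (Int × Int)) (s : pvBState) :
    xs.foldl pvStep s
    = (xs.foldl (fun m p => m.modify (PySem.Int.mod p.2 4) [] (· ++ [p.1])) s.1,
       xs.foldl (fun m p => m.modify (PySem.Int.mod p.2 5) [] (· ++ [p.1])) s.2.1,
       xs.foldl (fun m p => (PySem.List.pyRange (max (p.2 + 1) 1) 26 1).foldl
         (fun d t => d.modify t [] (· ++ [p.1])) m) s.2.2.1,
       xs.foldl (fun acc p => if p.2 == 0 then acc ++ [p.1] else acc) s.2.2.2.1,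
       xs.foldl (fun acc p => if PySem.Int.mod p.2 2 == 0 then acc ++ [p.1] else acc) s.2.2.2.2.1,
       xs.foldl (fun acc p => if PySem.Int.mod p.2 2 == 0 then acc else acc ++ [p.1]) s.2.2.2.2.2) := by
  induction xs generalizing s with
  | nil => rfl
  | cons p xs ih =>
    simp only [List.foldl_cons]
    rw [ih]
    rfl

lemma pv_m4 (d_vals : List Int) (c : Int) :
    (pvBuckets d_vals).1.getD c []
      = (PySem.List.pyRange 0 (d_vals.length : Int) 1).filter
          (fun i => PySem.Int.mod (PySem.List.pyGetD d_vals i 0) 4 == c) := by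
  rw [pvBuckets, pv_split]
  rw [pv_group_getD _ (fun p => PySem.Int.mod p.2 4)]
  rw [pv_enum_filter d_vals (fun v => PySem.Int.mod v 4 == c)]
  simp

lemma pv_m5 (d_vals : List Int) (c : Int) :
    (pvBuckets d_vals).2.1.getD c []
      = (PySem.List.pyRange 0 (d_vals.length : Int) 1).filter
          (fun i => PySem.Int.mod (PySem.List.pyGetD d_vals i 0) 5 == c) := by
  rw [pvBuckets, pv_split]
  rw [pv_group_getD _ (fun p => PySem.Int.mod p.2 5)]
  rw [pv_enum_filter d_vals (fun v => PySem.Int.mod v 5 == c)]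
  simp

lemma pv_thr (d_vals : List Int) (t : Int) (h1 : 1 ≤ t) (h2 : t ≤ 25) :
    (pvBuckets d_vals).2.2.1.getD t []
      = (PySem.List.pyRange 0 (d_vals.length : Int) 1).filter
          (fun i => decide (PySem.List.pyGetD d_vals i 0 < t)) := by
  rw [pvBuckets, pv_split]
  have key : ∀ (xs : List (Int × Int)) (d : PySem.Dict Int (List Int)),
      (xs.foldl (fun m p => (PySem.List.pyRange (max (p.2 + 1) 1) 26 1).foldl
        (fun d t => d.modify t [] (· ++ [p.1])) m) d).getD t []
      = d.getD t [] ++ (xs.filter (fun p => decide (p.2 < t))).map (·.1) := by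
    intro xs
    induction xs with
    | nil => simp
    | cons p xs ih =>
      intro d
      simp only [List.foldl_cons]
      rw [ih]
      rw [pv_getD_foldl_modify_mem _ (PySem.List.nodup_pyRange_one _ _) d p.1 t]
      by_cases hp : p.2 < t
      · rw [if_pos (by rw [PySem.List.mem_pyRange_one, max_le_iff]; omega)]
        simp [hp, List.append_assoc]
      · rw [if_neg (by rw [PySem.List.mem_pyRange_one, max_le_iff]; omega)]
        simp [hp]
  rw [key]
  rw [pv_enum_filter d_vals (fun v => decide (v < t))]
  simp

lemma pv_zeros (d_vals : List Int) :
    (pvBuckets d_vals).2.2.2.1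
      = (PySem.List.pyRange 0 (d_vals.length : Int) 1).filter
          (fun i => PySem.List.pyGetD d_vals i 0 == 0) := by
  rw [pvBuckets, pv_split]
  rw [PySem.List.foldl_append_if (fun p : Int × Int => p.2 == 0) (fun p => p.1)]
  rw [pv_enum_filter d_vals (fun v => v == 0)]
  simp

lemma pv_evens (d_vals : List Int) :
    (pvBuckets d_vals).2.2.2.2.1
      = (PySem.List.pyRange 0 (d_vals.length : Int) 1).filter
          (fun i => PySem.Int.mod (PySem.List.pyGetD d_vals i 0) 2 == 0) := by
  rw [pvBuckets, pv_split]
  rw [PySem.List.foldl_append_if (fun p : Int × Int => PySem.Int.mod p.2 2 == 0) (fun p => p.1)]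
  rw [pv_enum_filter d_vals (fun v => PySem.Int.mod v 2 == 0)]
  simp

lemma pv_odds (d_vals : List Int) :
    (pvBuckets d_vals).2.2.2.2.2
      = (PySem.List.pyRange 0 (d_vals.length : Int) 1).filter
          (fun i => PySem.Int.mod (PySem.List.pyGetD d_vals i 0) 2 == 1) := by
  rw [pvBuckets, pv_split]
  simp only [pv_odds_flip]
  rw [PySem.List.foldl_append_if (fun p : Int × Int => PySem.Int.mod p.2 2 == 1) (fun p => p.1)]
  rw [pv_enum_filter d_vals (fun v => PySem.Int.mod v 2 == 1)]
  simp

-- ===== VERDICT (by name: the statement is the Claim_ definition above) =====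
theorem null_masks_from_d_spec : Claim_equal_null_masks_from_d := by
  intro d_vals _hdom
  unfold Spec_null_masks_from_d
  simp only [null_masks_from_d, null_masks_from_d_alt]
  simp only [pv_m4, pv_m5, pv_zeros, pv_evens, pv_odds]
  have hth : ∀ m : List (String × List Int),
      (PySem.List.pyRange 1 26 1).foldl (fun masks t =>
        let nulls := (pvBuckets d_vals).2.2.1.getD t []
        if (nulls.length : Int) = 24 then
          masks ++ [("D<" ++ PySem.Int.toStr t ++ "(n=24)", nulls)]
        else if 22 ≤ (nulls.length : Int) ∧ (nulls.length : Int) ≤ 26 ∧ (nulls.length : Int) ≠ 24 then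
          masks ++ [("D<" ++ PySem.Int.toStr t ++ "(n=" ++ PySem.Int.toStr nulls.length ++ ")", nulls)]
        else masks) m
      = (PySem.List.pyRange 1 26 1).foldl (fun masks thresh =>
        let nulls := (PySem.List.pyRange 0 (d_vals.length : Int) 1).filter
          (fun i => decide (PySem.List.pyGetD d_vals i 0 < thresh))
        if (nulls.length : Int) = 24 then
          masks ++ [("D<" ++ PySem.Int.toStr thresh ++ "(n=24)", nulls)]
        else if 22 ≤ (nulls.length : Int) ∧ (nulls.length : Int) ≤ 26 ∧ (nulls.length : Int) ≠ 24 then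
          masks ++ [("D<" ++ PySem.Int.toStr thresh ++ "(n=" ++ PySem.Int.toStr nulls.length ++ ")", nulls)]
        else masks) m := by
    intro m
    apply PySem.List.foldl_congr_mem'
    intro t ht acc
    have hb := PySem.List.mem_pyRange_one.mp ht
    rw [pv_thr d_vals t (by omega) (by omega)]
  rw [hth]
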